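-- pv_equiv track=rewrite | github.com/melkarmo/Algorithmique | quadripartition/main_fichier.py | moyenneRegions
-- ===== SOURCE A (Python) =====
-- def moyenneRegions(proches,regions):
--     somme = [0,0,0]
--     n = len(proches)
--     for ind in proches:
--         r,g,b = regions[ind][-1]
--         somme[0] += r
--         somme[1] += g
--         somme[2] += b
--     return [u//n for u in somme]
-- ===== SOURCE B (Python) =====
-- def moyenneRegions(proches, regions):
--     counts = {}
--     for ind in proches:
--         counts[ind] = counts.get(ind, 0) + 1
--     r = g = b = 0
--     for ind, c in counts.items():
--         pr, pg, pb = regions[ind][-1]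
--         r += c * pr
--         g += c * pg
--         b += c * pb
--     n = len(proches)
--     return [r // n, g // n, b // n]
-- ===== Notes on version B (the rewrite author's own statement) =====
-- stated objective: alternative
-- what changed: B aggregates by multiplicity: it builds a hash counter of the indices and looks up each DISTINCT region's representative once, adding count*channel, instead of A's per-occurrence lookup loop; correct because the channel sums are linear in the multiplicities.
import Mathlib
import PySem

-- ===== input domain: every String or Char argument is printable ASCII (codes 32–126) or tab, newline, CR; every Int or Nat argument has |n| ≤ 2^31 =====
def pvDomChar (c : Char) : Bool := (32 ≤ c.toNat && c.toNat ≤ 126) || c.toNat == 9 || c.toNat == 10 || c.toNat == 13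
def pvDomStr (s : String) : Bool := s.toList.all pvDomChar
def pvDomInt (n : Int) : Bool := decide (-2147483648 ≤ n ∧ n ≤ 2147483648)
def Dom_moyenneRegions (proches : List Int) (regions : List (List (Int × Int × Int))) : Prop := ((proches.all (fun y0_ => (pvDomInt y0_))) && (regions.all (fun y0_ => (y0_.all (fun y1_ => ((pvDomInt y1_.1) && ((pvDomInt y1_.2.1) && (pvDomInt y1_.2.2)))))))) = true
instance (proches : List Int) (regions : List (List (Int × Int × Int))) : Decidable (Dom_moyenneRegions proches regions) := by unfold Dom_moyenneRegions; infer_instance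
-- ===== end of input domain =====

-- B aggregates by multiplicity: a counter over the indices, then one representative lookup per DISTINCT index weighted by its count (alternative, not measured faster).

-- ===== PORT A =====
-- regions[ind][-1]: Python negative-wrapping index, then last element; under Pre_ both succeed.
def pvRepA (regions : List (List (Int × Int × Int))) (ind : Int) : Int × Int × Int :=
  (PySem.List.pyGet? ((PySem.List.pyGet? regions ind).getD []) (-1)).getD (0, 0, 0)

def moyenneRegions (proches : List Int) (regions : List (List (Int × Int × Int))) : List Int :=
  let n : Int := (proches.length : Int)
  let somme : Int × Int × Int :=
    proches.foldl (fun s ind =>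
      let p := pvRepA regions ind
      (s.1 + p.1, s.2.1 + p.2.1, s.2.2 + p.2.2)) (0, 0, 0)
  [PySem.Int.floordiv somme.1 n, PySem.Int.floordiv somme.2.1 n, PySem.Int.floordiv somme.2.2 n]

-- ===== PORT B =====
def pvRepB (regions : List (List (Int × Int × Int))) (ind : Int) : Int × Int × Int :=
  (PySem.List.pyGet? ((PySem.List.pyGet? regions ind).getD []) (-1)).getD (0, 0, 0)

def moyenneRegions_alt (proches : List Int) (regions : List (List (Int × Int × Int))) : List Int :=
  -- counts[ind] = counts.get(ind, 0) + 1 over proches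
  let counts : PySem.Dict Int Int :=
    proches.foldl (fun d ind => d.modify ind 0 (· + 1)) PySem.Dict.empty
  -- one weighted lookup per distinct index, iterating the dict's items
  let rgb : Int × Int × Int :=
    counts.items.foldl (fun s kc =>
      let p := pvRepB regions kc.1
      (s.1 + kc.2 * p.1, s.2.1 + kc.2 * p.2.1, s.2.2 + kc.2 * p.2.2)) (0, 0, 0)
  let n : Int := (proches.length : Int)
  [PySem.Int.floordiv rgb.1 n, PySem.Int.floordiv rgb.2.1 n, PySem.Int.floordiv rgb.2.2 n]

-- ===== PRECONDITION & SPEC =====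
-- Pre_ excludes exactly the inputs where Python A raises: empty proches (ZeroDivisionError)
-- and indices whose region lookup fails or whose region is empty (IndexError).
def Pre_moyenneRegions (proches : List Int) (regions : List (List (Int × Int × Int))) : Prop :=
  proches ≠ [] ∧ ∀ ind ∈ proches, ((PySem.List.pyGet? regions ind).getD []) ≠ []
instance (proches : List Int) (regions : List (List (Int × Int × Int))) : Decidable (Pre_moyenneRegions proches regions) := by unfold Pre_moyenneRegions; infer_instance

def pvWitness_moyenneRegions : List Int × (List (List (Int × Int × Int))) := ([0, 0], [[(3, 5, 7)]])

def Spec_moyenneRegions (proches : List Int) (regions : List (List (Int × Int × Int))) (out : List Int) : Prop := out = moyenneRegions_alt proches regions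
instance (proches : List Int) (regions : List (List (Int × Int × Int))) (out : List Int) : Decidable (Spec_moyenneRegions proches regions out) := by unfold Spec_moyenneRegions; infer_instance

-- ===== CLAIM (what is proved, stated in full; the proofs are below) =====
def Claim_equal_moyenneRegions : Prop := ∀ (proches : List Int) (regions : List (List (Int × Int × Int))), Dom_moyenneRegions proches regions → Pre_moyenneRegions proches regions → Spec_moyenneRegions proches regions (moyenneRegions proches regions)

-- ===== LEMMAS AND PROOFS =====
-- A's fold is the triple of plain channel sums.
theorem pvFoldA_eq_sums (regions : List (List (Int × Int × Int))) (l : List Int) (s : Int × Int × Int) :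
    l.foldl (fun s ind =>
      let p := pvRepA regions ind
      (s.1 + p.1, s.2.1 + p.2.1, s.2.2 + p.2.2)) s
    = (s.1 + (l.map (fun k => (pvRepA regions k).1)).sum,
       s.2.1 + (l.map (fun k => (pvRepA regions k).2.1)).sum,
       s.2.2 + (l.map (fun k => (pvRepA regions k).2.2)).sum) := by
  induction l generalizing s with
  | nil => simp
  | cons a t ih =>
    rw [List.foldl_cons, ih]
    refine Prod.ext ?_ (Prod.ext ?_ ?_) <;> simp <;> ring

-- B's fold over a pair list is the triple of weighted channel sums.
theorem pvFoldB_eq_sums (regions : List (List (Int × Int × Int))) (L : List (Int × Int)) (s : Int × Int × Int) :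
    L.foldl (fun s kc =>
      let p := pvRepB regions kc.1
      (s.1 + kc.2 * p.1, s.2.1 + kc.2 * p.2.1, s.2.2 + kc.2 * p.2.2)) s
    = (s.1 + (L.map (fun kc => kc.2 * (pvRepB regions kc.1).1)).sum,
       s.2.1 + (L.map (fun kc => kc.2 * (pvRepB regions kc.1).2.1)).sum,
       s.2.2 + (L.map (fun kc => kc.2 * (pvRepB regions kc.1).2.2)).sum) := by
  induction L generalizing s with
  | nil => simp
  | cons a t ih =>
    rw [List.foldl_cons, ih]
    refine Prod.ext ?_ (Prod.ext ?_ ?_) <;> simp <;> ring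

-- Summing count-weighted values over the distinct elements equals summing over the list.
theorem pvWeightedSum (l : List Int) (f : Int → Int) :
    ((PySem.Set.ofList l).map (fun k => ((l.count k : Int)) * f k)).sum = (l.map f).sum := by
  rw [← PySem.List.dedup_eq_ofList]
  have hfin : (PySem.List.dedup l).toFinset = l.toFinset := by
    ext x; simp
  have h1 := List.sum_toFinset (l := PySem.List.dedup l)
      (fun k => ((l.count k : Int)) * f k) (PySem.List.nodup_dedup l)
  rw [hfin] at h1
  rw [← h1, Finset.sum_list_map_count]
  exact Finset.sum_congr rfl (fun m _ => by push_cast [nsmul_eq_mul]; ring)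

-- ===== VERDICT (by name: the statement is the Claim_ definition above) =====
theorem moyenneRegions_spec : Claim_equal_moyenneRegions := by
  intro proches regions _ _
  unfold Spec_moyenneRegions
  simp only [moyenneRegions, moyenneRegions_alt, ← PySem.Dict.counter_eq_foldl,
    PySem.Dict.items_counter, pvFoldA_eq_sums, pvFoldB_eq_sums, List.map_map, Function.comp_def]
  rw [pvWeightedSum proches (fun k => (pvRepB regions k).1),
      pvWeightedSum proches (fun k => (pvRepB regions k).2.1),
      pvWeightedSum proches (fun k => (pvRepB regions k).2.2)]
  rfl
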